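-- pv_equiv track=rewrite | github.com/globusgenomics/galaxy | lib/galaxy/webapps/galaxy/controllers/workflow.py | _extend_with_matched_combos
-- ===== SOURCE A (Python) =====
-- def _extend_with_matched_combos(single_inputs, multi_inputs):
--     if len(multi_inputs) == 0:
--         return [single_inputs]
--
--     matched_multi_inputs = []
--
--     first_multi_input_key = next(iter(multi_inputs.keys()))
--     first_multi_value = multi_inputs.get(first_multi_input_key)
--
--     for value in first_multi_value:
--         new_inputs = _copy_and_extend_inputs(single_inputs, first_multi_input_key, value)
--         matched_multi_inputs.append(new_inputs)
--
--     for multi_input_key, multi_input_values in multi_inputs.items():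
--         if multi_input_key == first_multi_input_key:
--             continue
--         if len(multi_input_values) != len(first_multi_value):
--             raise Exception("Failed to match up multi-select inputs, must select equal number of data files in each multiselect")
--         for index, value in enumerate(multi_input_values):
--             matched_multi_inputs[index][multi_input_key] = value
--     return matched_multi_inputs
--
-- def _copy_and_extend_inputs(inputs, key, value):
--     new_inputs = dict(inputs)
--     new_inputs[key] = value
--     return new_inputs
-- ===== SOURCE B (Python) =====
-- def _extend_with_matched_combos(single_inputs, multi_inputs):
--     if len(multi_inputs) == 0:
--         return [single_inputs]
--     keys = list(multi_inputs.keys())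
--     n = len(multi_inputs[keys[0]])
--     for key in keys[1:]:
--         if len(multi_inputs[key]) != n:
--             raise Exception("Failed to match up multi-select inputs, must select equal number of data files in each multiselect")
--     results = []
--     for i in range(n):
--         row = dict(single_inputs)
--         for key in keys:
--             row[key] = multi_inputs[key][i]
--         results.append(row)
--     return results
-- ===== Notes on version B (the rewrite author's own statement) =====
-- stated objective: simpler
-- what changed: A builds rows from the first key's values and then mutates the row dicts column-by-column while checking lengths mid-loop; B validates all lengths up front and then builds each result row in a single row-major pass over the keys.
import Mathlib
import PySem

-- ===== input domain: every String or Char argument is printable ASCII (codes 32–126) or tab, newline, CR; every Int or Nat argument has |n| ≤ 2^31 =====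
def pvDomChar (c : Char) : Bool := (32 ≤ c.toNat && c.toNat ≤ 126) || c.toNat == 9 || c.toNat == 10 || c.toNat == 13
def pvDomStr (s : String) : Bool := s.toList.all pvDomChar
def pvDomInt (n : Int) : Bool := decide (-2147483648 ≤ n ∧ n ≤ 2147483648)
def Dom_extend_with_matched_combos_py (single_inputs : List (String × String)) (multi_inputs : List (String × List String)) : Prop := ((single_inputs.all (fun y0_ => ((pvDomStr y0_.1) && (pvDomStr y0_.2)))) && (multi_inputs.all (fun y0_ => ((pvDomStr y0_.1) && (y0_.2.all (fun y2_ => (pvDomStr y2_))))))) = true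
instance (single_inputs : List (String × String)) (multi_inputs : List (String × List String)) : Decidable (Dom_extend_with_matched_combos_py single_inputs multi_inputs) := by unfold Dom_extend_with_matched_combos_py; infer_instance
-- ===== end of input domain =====

-- B validates all multi-input lengths up front and builds each result row in one row-major pass,
-- instead of A's "build rows from the first key, then mutate the rows column-by-column" (objective: simpler).

-- ===== PORT A =====
-- _copy_and_extend_inputs: dict(inputs) then new_inputs[key] = value
def pvCopyAndExtendInputs (inputs : List (String × String)) (key : String) (value : String) : PySem.Dict String String :=
  (PySem.Dict.ofList inputs).insert key value

def extend_with_matched_combos_py (single_inputs : List (String × String)) (multi_inputs : List (String × List String)) : List (List (String × String)) :=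
  let md := PySem.Dict.ofList multi_inputs
  if md.items.length = 0 then [single_inputs] else
  let first_multi_input_key := md.keys.headD ""
  let first_multi_value := (md.get? first_multi_input_key).getD []
  let matched := first_multi_value.foldl
      (fun acc v => acc ++ [pvCopyAndExtendInputs single_inputs first_multi_input_key v]) []
  let matched := md.items.foldl (fun acc p =>
      if p.1 == first_multi_input_key then acc
      else if p.2.length ≠ first_multi_value.length then acc   -- Python raises Exception here; excluded by Pre_
      else (PySem.List.enumerate p.2 0).foldl
        -- matched_multi_inputs[index][multi_input_key] = value; enumerate indices are 0 ≤ index < len(matched), so set/getD are exact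
        (fun acc2 iv => acc2.set iv.1.toNat ((acc2.getD iv.1.toNat PySem.Dict.empty).insert p.1 iv.2)) acc) matched
  matched.map (fun d => d.items)

-- ===== PORT B =====
def extend_with_matched_combos_py_alt (single_inputs : List (String × String)) (multi_inputs : List (String × List String)) : List (List (String × String)) :=
  match (PySem.Dict.ofList multi_inputs).items with
  | [] => [single_inputs]
  | (k0, v0) :: rest =>
    if rest.any (fun p => p.2.length ≠ v0.length) then []   -- B raises the same Exception here; excluded by Pre_
    else (List.range v0.length).map (fun i =>
      (((k0, v0) :: rest).foldl (fun d p => d.insert p.1 (p.2.getD i "")) (PySem.Dict.ofList single_inputs)).items)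

-- ===== PRECONDITION & SPEC =====
-- Pre_ excludes exactly the inputs where some multi-input value list differs in length from the first one:
-- there A (and B) raise "Failed to match up multi-select inputs, …".
def Pre_extend_with_matched_combos_py (single_inputs : List (String × String)) (multi_inputs : List (String × List String)) : Prop :=
  ∀ p ∈ (PySem.Dict.ofList multi_inputs).items,
    p.2.length = ((PySem.Dict.ofList multi_inputs).items.headD ("", [])).2.length
instance (single_inputs : List (String × String)) (multi_inputs : List (String × List String)) : Decidable (Pre_extend_with_matched_combos_py single_inputs multi_inputs) := by unfold Pre_extend_with_matched_combos_py; infer_instance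

def pvWitness_extend_with_matched_combos_py : (List (String × String)) × (List (String × List String)) :=
  ([("a", "1")], [("x", ["u", "v"]), ("y", ["p", "q"])])

def Spec_extend_with_matched_combos_py (single_inputs : List (String × String)) (multi_inputs : List (String × List String)) (out : List (List (String × String))) : Prop := out = extend_with_matched_combos_py_alt single_inputs multi_inputs
instance (single_inputs : List (String × String)) (multi_inputs : List (String × List String)) (out : List (List (String × String))) : Decidable (Spec_extend_with_matched_combos_py single_inputs multi_inputs out) := by unfold Spec_extend_with_matched_combos_py; infer_instance

-- ===== CLAIM (what is proved, stated in full; the proofs are below) =====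
def Claim_equal_extend_with_matched_combos_py : Prop := ∀ (single_inputs : List (String × String)) (multi_inputs : List (String × List String)), Dom_extend_with_matched_combos_py single_inputs multi_inputs → Pre_extend_with_matched_combos_py single_inputs multi_inputs → Spec_extend_with_matched_combos_py single_inputs multi_inputs (extend_with_matched_combos_py single_inputs multi_inputs)

-- ===== LEMMAS AND PROOFS =====

-- the per-column enumerate loop of A is a zipWith over the rows
lemma pv_enumFold (k : String) : ∀ (vs : List String) (pre rows : List (PySem.Dict String String)),
    vs.length = rows.length →
    (PySem.List.enumerate vs (pre.length : Int)).foldl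
        (fun acc2 iv => acc2.set iv.1.toNat ((acc2.getD iv.1.toNat PySem.Dict.empty).insert k iv.2)) (pre ++ rows)
      = pre ++ rows.zipWith (fun d v => d.insert k v) vs := by
  intro vs
  induction vs with
  | nil =>
    intro pre rows h
    rw [List.length_eq_zero_iff.mp h.symm]
    simp [PySem.List.enumerate_nil]
  | cons v vs ih =>
    intro pre rows h
    match rows with
    | [] => simp at h
    | r :: rs =>
      rw [PySem.List.enumerate_cons]
      simp only [List.foldl_cons]
      have hset : (pre ++ r :: rs).set ((pre.length : Int)).toNat
            (((pre ++ r :: rs).getD ((pre.length : Int)).toNat PySem.Dict.empty).insert k v)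
          = (pre ++ [r.insert k v]) ++ rs := by
        have hg : (pre ++ r :: rs).getD pre.length PySem.Dict.empty = r := by
          simp [List.getD]
        simp [List.append_assoc]
      rw [hset]
      have hlen : ((pre.length : Int) + 1) = ((pre ++ [r.insert k v]).length : Int) := by
        simp
      rw [hlen, ih (pre ++ [r.insert k v]) rs (by simpa using h)]
      simp [List.append_assoc]

lemma pv_getD_map_range {α : Type} (f : Nat → α) (n i : Nat) (hi : i < n) (d : α) :
    ((List.range n).map f).getD i d = f i := by
  simp [List.getD, hi]

-- column-major mutation over a list of keys = row-major rebuild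
lemma pv_zipfold : ∀ (ks : List (String × List String)) (rows : List (PySem.Dict String String)) (n : Nat),
    rows.length = n → (∀ p ∈ ks, p.2.length = n) →
    ks.foldl (fun acc p => (PySem.List.enumerate p.2 0).foldl
        (fun acc2 iv => acc2.set iv.1.toNat ((acc2.getD iv.1.toNat PySem.Dict.empty).insert p.1 iv.2)) acc) rows
      = (List.range n).map (fun i => ks.foldl (fun d p => d.insert p.1 (p.2.getD i "")) (rows.getD i PySem.Dict.empty)) := by
  intro ks
  induction ks with
  | nil =>
    intro rows n hn _
    subst hn
    apply List.ext_getElem (by simp)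
    intro i h1 h2
    simp [List.getD, (by simpa using h2 : i < rows.length)]
  | cons p tl ih =>
    intro rows n hn hlen
    simp only [List.foldl_cons]
    have hp : p.2.length = rows.length := by rw [hn]; exact hlen p (by simp)
    have hz := pv_enumFold p.1 p.2 [] rows hp
    simp only [List.nil_append, List.length_nil, Nat.cast_zero] at hz
    rw [hz]
    have hzlen : (rows.zipWith (fun d v => d.insert p.1 v) p.2).length = n := by
      simp [hp, hn]
    rw [ih _ n hzlen (fun q hq => hlen q (by simp [hq]))]
    apply List.map_congr_left
    intro i hi
    have hin : i < n := List.mem_range.mp hi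
    have hg : (rows.zipWith (fun d v => d.insert p.1 v) p.2).getD i PySem.Dict.empty
        = (rows.getD i PySem.Dict.empty).insert p.1 (p.2.getD i "") := by
      have h1 : i < rows.length := by omega
      have h2 : i < p.2.length := by omega
      simp [List.getD, List.getElem_zipWith, h1, h2]
    rw [hg]

-- a map over a list is the same map indexed over range
lemma pv_map_eq_range_map {α : Type} (f : String → α) (vs : List String) :
    vs.map f = (List.range vs.length).map (fun i => f (vs.getD i "")) := by
  apply List.ext_getElem (by simp)
  intro i h1 h2
  have : i < vs.length := by simpa using h1
  simp [List.getD, this]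

lemma pv_main (single_inputs : List (String × String)) (multi_inputs : List (String × List String))
    (hpre : Pre_extend_with_matched_combos_py single_inputs multi_inputs) :
    extend_with_matched_combos_py single_inputs multi_inputs
      = extend_with_matched_combos_py_alt single_inputs multi_inputs := by
  unfold Pre_extend_with_matched_combos_py at hpre
  unfold extend_with_matched_combos_py extend_with_matched_combos_py_alt
  cases hitems : (PySem.Dict.ofList multi_inputs).items with
  | nil => simp [hitems]
  | cons hd rest =>
    obtain ⟨k0, v0⟩ := hd
    rw [hitems] at hpre
    have hlens : ∀ p ∈ rest, p.2.length = v0.length := by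
      intro p hp
      simpa using hpre p (by simp [hp])
    have hnd : ((PySem.Dict.ofList multi_inputs).keys).Nodup := PySem.Dict.nodup_keys_ofList multi_inputs
    have hkeys : (PySem.Dict.ofList multi_inputs).keys = k0 :: rest.map Prod.fst := by
      simp [PySem.Dict.keys, hitems]
    rw [hkeys] at hnd
    have hne : ∀ p ∈ rest, p.1 ≠ k0 := by
      intro p hp h
      exact (List.nodup_cons.mp hnd).1 (h ▸ List.mem_map_of_mem hp)
    have hget : (PySem.Dict.ofList multi_inputs).get? k0 = some v0 :=
      PySem.Dict.get?_of_mem_items (PySem.Dict.ofList multi_inputs)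
        (by rw [hitems]; exact List.mem_cons_self) (by rw [hkeys]; exact hnd)
    simp only [hitems, hkeys, hget, List.length_cons, List.headD_cons, Option.getD_some]
    -- A's if-branch is the else branch; B's any-guard is false
    have hany : rest.any (fun p => decide ¬ p.2.length = v0.length) = false := by
      simp only [List.any_eq_false]
      intro p hp
      simp [hlens p hp]
    rw [if_neg (by simp)]
    simp only [hany, Bool.false_eq_true, if_false]
    -- first loop = map
    rw [PySem.List.foldl_append_singleton_eq_map]
    -- second loop: drop the guards on rest, skip the first item
    simp only [List.foldl_cons, BEq.rfl, if_true]
    rw [List.nil_append]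
    have hrew := PySem.List.foldl_congr_mem' rest
      (fun (acc : List (PySem.Dict String String)) (p : String × List String) =>
        if p.1 == k0 then acc
        else if p.2.length ≠ v0.length then acc
        else (PySem.List.enumerate p.2 0).foldl
          (fun acc2 iv => acc2.set iv.1.toNat ((acc2.getD iv.1.toNat PySem.Dict.empty).insert p.1 iv.2)) acc)
      (fun (acc : List (PySem.Dict String String)) (p : String × List String) =>
        (PySem.List.enumerate p.2 0).foldl
          (fun acc2 iv => acc2.set iv.1.toNat ((acc2.getD iv.1.toNat PySem.Dict.empty).insert p.1 iv.2)) acc)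
      (List.map (pvCopyAndExtendInputs single_inputs k0) v0)
      (by intro p hp acc
          simp [hne p hp, hlens p hp])
    rw [hrew]
    rw [pv_map_eq_range_map (fun v => pvCopyAndExtendInputs single_inputs k0 v) v0]
    rw [pv_zipfold rest _ v0.length (by simp) hlens]
    rw [List.map_map]
    apply List.map_congr_left
    intro i hi
    have hin : i < v0.length := List.mem_range.mp hi
    simp only [Function.comp_apply]
    rw [pv_getD_map_range _ _ _ hin]
    simp [pvCopyAndExtendInputs]

-- ===== VERDICT (by name: the statement is the Claim_ definition above) =====
theorem extend_with_matched_combos_py_spec : Claim_equal_extend_with_matched_combos_py := by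
  intro si mi _ hpre
  unfold Spec_extend_with_matched_combos_py
  exact pv_main si mi hpre
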